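-- pv_equiv track=rewrite | github.com/maungthway/Oxidation-State-Probability-Filter | myphasediagram_v1_1.py | match_sides_from_binaries
-- ===== SOURCE A (Python) =====
-- def match_sides_from_binaries (binaries_element_list, three_elements):
--
--     index_AC = [0]  * len(binaries_element_list)
--     index_AB = [0]  * len(binaries_element_list)
--     index_BC = [0]  * len(binaries_element_list)
--
--
--     for index,i in enumerate(binaries_element_list):
--         if str(three_elements[0]) == str(i[0]) and str(three_elements[2]) == str(i[1]) \
--         or str(three_elements[0]) == str(i[1]) and str(three_elements[2]) == str(i[0]):
--             index_AC[index] = 1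
--
--         elif str(three_elements[0]) == str(i[0]) and str(three_elements[1]) == str(i[1]) \
--         or str(three_elements[0]) == str(i[1]) and str(three_elements[1]) == str(i[0]):
--             index_AB[index] = 1
--
--         elif str(three_elements[1]) == str(i[0]) and str(three_elements[2]) == str(i[1]) \
--         or str(three_elements[1]) == str(i[1]) and str(three_elements[2]) == str(i[0]) :
--             index_BC[index] = 1
--
--     return index_AC, index_AB, index_BC
-- ===== SOURCE B (Python) =====
-- def match_sides_from_binaries(binaries_element_list, three_elements):
--     # invert: group the indices of the binaries by their unordered element pair
--     n = len(binaries_element_list)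
--     buckets = {}
--     for idx, i in enumerate(binaries_element_list):
--         buckets.setdefault(frozenset((str(i[0]), str(i[1]))), []).append(idx)
--     a = str(three_elements[0])
--     b = str(three_elements[1])
--     c = str(three_elements[2])
--     # probe the three sides in priority order AC, AB, BC; pop consumes a bucket,
--     # so on degenerate ternaries a colliding key is claimed by the earlier side
--     result = []
--     for side in ((a, c), (a, b), (b, c)):
--         marks = [0] * n
--         for idx in buckets.pop(frozenset(side), []):
--             marks[idx] = 1
--         result.append(marks)
--     return tuple(result)
-- ===== Notes on version B (the rewrite author's own statement) =====
-- stated objective: alternative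
-- what changed: Replaces A's per-binary elif cascade of ordered comparisons against the three sides by an inverted index: one grouping pass buckets binary indices by their unordered element pair, then each side (probed AC, AB, BC with dict.pop so an earlier side consumes a colliding key, preserving the elif priority) scatters 1s from its bucket into a zero list.
-- outside the precondition, e.g. on match_sides_from_binaries([], []): A returns ([], [], []), B raises IndexError
import Mathlib
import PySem

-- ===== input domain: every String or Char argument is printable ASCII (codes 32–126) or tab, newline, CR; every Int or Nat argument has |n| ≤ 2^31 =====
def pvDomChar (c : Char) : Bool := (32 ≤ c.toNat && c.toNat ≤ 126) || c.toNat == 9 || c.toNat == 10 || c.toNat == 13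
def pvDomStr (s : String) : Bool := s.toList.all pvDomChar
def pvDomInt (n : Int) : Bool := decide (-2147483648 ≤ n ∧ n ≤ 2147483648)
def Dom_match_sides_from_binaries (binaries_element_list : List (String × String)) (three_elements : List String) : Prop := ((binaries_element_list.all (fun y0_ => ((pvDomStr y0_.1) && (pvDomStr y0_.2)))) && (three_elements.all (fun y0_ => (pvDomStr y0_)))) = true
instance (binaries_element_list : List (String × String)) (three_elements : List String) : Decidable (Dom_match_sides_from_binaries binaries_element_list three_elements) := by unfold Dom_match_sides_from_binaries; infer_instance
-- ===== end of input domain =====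

-- B inverts A's pass: it groups binary indices by their unordered element pair once, then each
-- side pops its bucket and scatters 1s into a zero list (objective: alternative, same cost).

-- ===== PORT A =====
-- literal transliteration of A: three zero lists, enumerate loop, elif chain setting the
-- matching list's entry to 1 (str(x) on a str is x itself, so the comparisons are ==;
-- three_elements[k] is in range under Pre_, so pyGetD's default is never taken)
def match_sides_from_binaries (binaries_element_list : List (String × String)) (three_elements : List String) : List Int × List Int × List Int :=
  let index_AC : List Int := List.replicate binaries_element_list.length 0
  let index_AB : List Int := List.replicate binaries_element_list.length 0
  let index_BC : List Int := List.replicate binaries_element_list.length 0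
  (PySem.List.enumerate binaries_element_list 0).foldl
    (fun acc p =>
      if (PySem.List.pyGetD three_elements 0 "" == p.2.1 && PySem.List.pyGetD three_elements 2 "" == p.2.2)
         || (PySem.List.pyGetD three_elements 0 "" == p.2.2 && PySem.List.pyGetD three_elements 2 "" == p.2.1) then
        (acc.1.set p.1.toNat 1, acc.2.1, acc.2.2)
      else if (PySem.List.pyGetD three_elements 0 "" == p.2.1 && PySem.List.pyGetD three_elements 1 "" == p.2.2)
         || (PySem.List.pyGetD three_elements 0 "" == p.2.2 && PySem.List.pyGetD three_elements 1 "" == p.2.1) then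
        (acc.1, acc.2.1.set p.1.toNat 1, acc.2.2)
      else if (PySem.List.pyGetD three_elements 1 "" == p.2.1 && PySem.List.pyGetD three_elements 2 "" == p.2.2)
         || (PySem.List.pyGetD three_elements 1 "" == p.2.2 && PySem.List.pyGetD three_elements 2 "" == p.2.1) then
        (acc.1, acc.2.1, acc.2.2.set p.1.toNat 1)
      else acc)
    (index_AC, index_AB, index_BC)

-- ===== PORT B =====
-- fz x y ports frozenset((x, y)): the canonical (sorted) form of the unordered pair, so
-- fz x y = fz u v exactly when the two frozensets are equal (exact for two-element frozensets)
def fz (x y : String) : String × String := if x ≤ y then (x, y) else (y, x)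

-- 'marks = [0]*n; for idx in bucket: marks[idx] = 1' (every stored idx is < n)
def pvScatter (n : Nat) (bucket : List Int) : List Int :=
  bucket.foldl (fun l idx => l.set idx.toNat 1) (List.replicate n 0)

-- transliteration of Source B: one grouping pass (setdefault(..., []).append(idx) is modify with
-- default []), then the three sides probed in order AC, AB, BC; pop(key, []) is getD + erase
def match_sides_from_binaries_alt (binaries_element_list : List (String × String)) (three_elements : List String) : List Int × List Int × List Int :=
  let n := binaries_element_list.length
  let buckets : PySem.Dict (String × String) (List Int) :=
    (PySem.List.enumerate binaries_element_list 0).foldl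
      (fun d p => d.modify (fz p.2.1 p.2.2) [] (· ++ [p.1])) PySem.Dict.empty
  let a := PySem.List.pyGetD three_elements 0 ""
  let b := PySem.List.pyGetD three_elements 1 ""
  let c := PySem.List.pyGetD three_elements 2 ""
  let index_AC := pvScatter n (buckets.getD (fz a c) [])
  let buckets := buckets.erase (fz a c)
  let index_AB := pvScatter n (buckets.getD (fz a b) [])
  let buckets := buckets.erase (fz a b)
  let index_BC := pvScatter n (buckets.getD (fz b c) [])
  (index_AC, index_AB, index_BC)

-- ===== PRECONDITION & SPEC =====
-- Pre_ excludes three_elements shorter than 3, where A raises IndexError on any nonempty binaries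
-- list, and where, with an empty binaries list, only A's loop-free accident returns empty lists while
-- B (which always reads the three elements first) raises IndexError.
def Pre_match_sides_from_binaries (binaries_element_list : List (String × String)) (three_elements : List String) : Prop := 3 ≤ three_elements.length
instance (binaries_element_list : List (String × String)) (three_elements : List String) : Decidable (Pre_match_sides_from_binaries binaries_element_list three_elements) := by unfold Pre_match_sides_from_binaries; infer_instance

def pvWitness_match_sides_from_binaries : (List (String × String)) × List String := ([("Li", "O"), ("O", "Li"), ("Fe", "O"), ("Li", "Li")], ["Li", "Fe", "O"])

def Spec_match_sides_from_binaries (binaries_element_list : List (String × String)) (three_elements : List String) (out : List Int × List Int × List Int) : Prop := out = match_sides_from_binaries_alt binaries_element_list three_elements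
instance (binaries_element_list : List (String × String)) (three_elements : List String) (out : List Int × List Int × List Int) : Decidable (Spec_match_sides_from_binaries binaries_element_list three_elements out) := by unfold Spec_match_sides_from_binaries; infer_instance

-- ===== CLAIM (what is proved, stated in full; the proofs are below) =====
def Claim_equal_match_sides_from_binaries : Prop := ∀ (binaries_element_list : List (String × String)) (three_elements : List String), Dom_match_sides_from_binaries binaries_element_list three_elements → Pre_match_sides_from_binaries binaries_element_list three_elements → Spec_match_sides_from_binaries binaries_element_list three_elements (match_sides_from_binaries binaries_element_list three_elements)

-- ===== LEMMAS AND PROOFS =====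

-- A's loop: setting position k of pre ++ zeros, element by element, turns the zeros into a map
theorem pv_loopA {α : Type} (c1 c2 c3 : α → Bool) (xs : List α) : ∀ (k : Nat) (pa pb pc : List Int), pa.length = k → pb.length = k → pc.length = k →
    (PySem.List.enumerate xs (k : Int)).foldl
      (fun (acc : List Int × List Int × List Int) p =>
        if c1 p.2 then (acc.1.set p.1.toNat 1, acc.2.1, acc.2.2)
        else if c2 p.2 then (acc.1, acc.2.1.set p.1.toNat 1, acc.2.2)
        else if c3 p.2 then (acc.1, acc.2.1, acc.2.2.set p.1.toNat 1)
        else acc)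
      (pa ++ List.replicate xs.length 0, pb ++ List.replicate xs.length 0, pc ++ List.replicate xs.length 0)
    = (pa ++ xs.map (fun x => if c1 x then 1 else 0),
       pb ++ xs.map (fun x => if c1 x then 0 else if c2 x then 1 else 0),
       pc ++ xs.map (fun x => if c1 x then 0 else if c2 x then 0 else if c3 x then 1 else 0)) := by
  induction xs with
  | nil => intro k pa pb pc _ _ _; simp [PySem.List.enumerate]
  | cons x xs ih =>
    intro k pa pb pc ha hb hc
    have hset : ∀ (p : List Int), p.length = k → (p ++ (0 : Int) :: List.replicate xs.length 0).set k 1 = (p ++ [1]) ++ List.replicate xs.length 0 := by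
      intro p hp
      rw [List.set_append_right _ _ (by omega)]
      simp [hp]
    have hkeep : ∀ (p : List Int), p ++ (0 : Int) :: List.replicate xs.length 0 = (p ++ [0]) ++ List.replicate xs.length 0 := by
      intro p; simp
    have hcast : ((k : Int) + 1) = ((k + 1 : Nat) : Int) := by push_cast; ring
    simp only [List.length_cons, List.replicate_succ, PySem.List.enumerate_cons, List.foldl_cons]
    cases h1 : c1 x with
    | true =>
      simp only [if_true, Int.toNat_natCast, hset pa ha, hkeep pb, hkeep pc, hcast]
      rw [ih (k+1) _ _ _ (by simp [ha]) (by simp [hb]) (by simp [hc])]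
      simp [h1]
    | false =>
      cases h2 : c2 x with
      | true =>
        simp only [Bool.false_eq_true, if_true, if_false, Int.toNat_natCast, hset pb hb, hkeep pa, hkeep pc, hcast]
        rw [ih (k+1) _ _ _ (by simp [ha]) (by simp [hb]) (by simp [hc])]
        simp [h1, h2]
      | false =>
        cases h3 : c3 x with
        | true =>
          simp only [Bool.false_eq_true, if_true, if_false, Int.toNat_natCast, hset pc hc, hkeep pa, hkeep pb, hcast]
          rw [ih (k+1) _ _ _ (by simp [ha]) (by simp [hb]) (by simp [hc])]
          simp [h1, h2, h3]
        | false =>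
          simp only [Bool.false_eq_true, if_false, hkeep pa, hkeep pb, hkeep pc, hcast]
          rw [ih (k+1) _ _ _ (by simp [ha]) (by simp [hb]) (by simp [hc])]
          simp [h1, h2, h3]

-- canonical pairs are equal exactly when the unordered pairs coincide
theorem fz_eq_iff (x y u v : String) : fz x y = fz u v ↔ (u = x ∧ v = y) ∨ (u = y ∧ v = x) := by
  unfold fz
  split_ifs with h1 h2 h2 <;> simp only [Prod.mk.injEq] <;> constructor
  · rintro ⟨rfl, rfl⟩; exact Or.inl ⟨rfl, rfl⟩
  · rintro (⟨rfl, rfl⟩ | ⟨rfl, rfl⟩)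
    · exact ⟨rfl, rfl⟩
    · have e := le_antisymm h1 h2; exact ⟨e, e.symm⟩
  · rintro ⟨rfl, rfl⟩; exact Or.inr ⟨rfl, rfl⟩
  · rintro (⟨rfl, rfl⟩ | ⟨rfl, rfl⟩)
    · exact absurd h1 h2
    · exact ⟨rfl, rfl⟩
  · rintro ⟨rfl, rfl⟩; exact Or.inr ⟨rfl, rfl⟩
  · rintro (⟨rfl, rfl⟩ | ⟨rfl, rfl⟩)
    · exact absurd h2 h1
    · exact ⟨rfl, rfl⟩
  · rintro ⟨rfl, rfl⟩; exact Or.inl ⟨rfl, rfl⟩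
  · rintro (⟨rfl, rfl⟩ | ⟨rfl, rfl⟩)
    · exact ⟨rfl, rfl⟩
    · exact absurd (le_of_lt (lt_of_not_ge h1)) h2

-- erase lemmas (none in the prelude's book): erasing a key makes its lookup the default …
theorem pv_getD_erase_self {κ ν : Type} [BEq κ] [LawfulBEq κ] (d : PySem.Dict κ ν) (k : κ) (dflt : ν) :
    (d.erase k).getD k dflt = dflt := by
  have h : List.find? (fun p => p.1 == k) (d.items.filter (fun p => !(p.1 == k))) = none := by
    rw [List.find?_eq_none]
    intro p hp
    simp only [List.mem_filter, Bool.not_eq_eq_eq_not, Bool.not_true] at hp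
    simp [hp.2]
  simp [PySem.Dict.getD, PySem.Dict.get?, PySem.Dict.erase, h]

-- … and leaves every other lookup unchanged
theorem pv_getD_erase_of_ne {κ ν : Type} [BEq κ] [LawfulBEq κ] (d : PySem.Dict κ ν) (k j : κ) (dflt : ν)
    (h : j ≠ k) : (d.erase k).getD j dflt = d.getD j dflt := by
  have hfind : ∀ (l : List (κ × ν)), List.find? (fun p => p.1 == j) (l.filter (fun p => !(p.1 == k))) = List.find? (fun p => p.1 == j) l := by
    intro l
    induction l with
    | nil => rfl
    | cons p l ih =>
      by_cases hj : p.1 = j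
      · subst hj
        rw [List.filter_cons, if_pos (by simp [h])]
        rw [List.find?_cons_of_pos (by simp), List.find?_cons_of_pos (by simp)]
      · by_cases hk : p.1 = k
        · rw [List.filter_cons, if_neg (by simp [hk]), ih,
            List.find?_cons_of_neg (by simp [hj])]
        · rw [List.filter_cons, if_pos (by simp [hk]),
            List.find?_cons_of_neg (by simp [hj]), List.find?_cons_of_neg (by simp [hj]), ih]
  simp [PySem.Dict.getD, PySem.Dict.get?, PySem.Dict.erase, hfind]

-- the grouping pass: each bucket holds exactly the indices of the binaries with that unordered pair
theorem pv_bucket (bl : List (String × String)) (K : String × String) :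
    (((PySem.List.enumerate bl 0).foldl
        (fun (d : PySem.Dict (String × String) (List Int)) p => d.modify (fz p.2.1 p.2.2) [] (· ++ [p.1]))
        PySem.Dict.empty).getD K [])
      = (((PySem.List.enumerate bl 0).filter (fun p => fz p.2.1 p.2.2 == K)).map (·.1)) := by
  have hmap : (PySem.List.enumerate bl 0).foldl
        (fun (d : PySem.Dict (String × String) (List Int)) p => d.modify (fz p.2.1 p.2.2) [] (· ++ [p.1]))
        PySem.Dict.empty
      = ((PySem.List.enumerate bl 0).map (fun p => (fz p.2.1 p.2.2, p.1))).foldl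
        (fun (d : PySem.Dict (String × String) (List Int)) q => d.modify q.1 [] (· ++ [q.2]))
        PySem.Dict.empty := by
    rw [List.foldl_map]
  rw [hmap, PySem.Dict.getD_foldl_modify_append, PySem.Dict.getD_empty, List.filter_map, List.map_map]
  simp [Function.comp_def]

-- the scatter loop keeps the length and writes 1 exactly at the listed positions
theorem pv_scatter_len (bucket : List Int) : ∀ (l : List Int),
    (bucket.foldl (fun l idx => l.set idx.toNat 1) l).length = l.length := by
  induction bucket with
  | nil => intro l; rfl
  | cons x xs ih => intro l; simpa using ih (l.set x.toNat 1)

theorem pv_scatter_get (bucket : List Int) : ∀ (l : List Int) (j : Nat) (hj : j < l.length),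
    (bucket.foldl (fun l idx => l.set idx.toNat 1) l)[j]? =
      some (if ∃ i ∈ bucket, i.toNat = j then 1 else l[j]'hj) := by
  induction bucket with
  | nil => intro l j hj; simp [List.getElem?_eq_getElem hj]
  | cons x xs ih =>
    intro l j hj
    rw [List.foldl_cons, ih (l.set x.toNat 1) j (by simpa)]
    by_cases hx : x.toNat = j
    · simp [hx, List.getElem_set_self]
    · by_cases hex : ∃ i ∈ xs, i.toNat = j
      · simp [hex, hx]
      · simp [hex, hx, List.getElem_set_ne hx]

-- scattering a filtered enumerate's indices into zeros IS the indicator map over the list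
theorem pv_scatter (bl : List (String × String)) (q : String × String → Bool) :
    pvScatter bl.length (((PySem.List.enumerate bl 0).filter (fun p => q p.2)).map (·.1))
      = bl.map (fun x => if q x then 1 else 0) := by
  unfold pvScatter
  apply List.ext_getElem?
  intro j
  by_cases h2 : j < bl.length
  · have hmem : (∃ i ∈ ((PySem.List.enumerate bl 0).filter (fun p => q p.2)).map (·.1), i.toNat = j)
        ↔ q (bl[j]'h2) = true := by
      constructor
      · rintro ⟨i, hi, hij⟩
        simp only [List.mem_map, List.mem_filter, PySem.List.mem_enumerate_iff] at hi
        obtain ⟨p, ⟨⟨k, hk, rfl⟩, hq⟩, rfl⟩ := hi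
        simp only [zero_add, Int.toNat_natCast] at hij
        subst hij
        simpa using hq
      · intro hq
        refine ⟨(j : Int), ?_, by simp⟩
        simp only [List.mem_map, List.mem_filter, PySem.List.mem_enumerate_iff]
        exact ⟨((j : Int), bl[j]'h2), ⟨⟨j, h2, by simp⟩, hq⟩, rfl⟩
    rw [pv_scatter_get _ _ j (by simpa), List.getElem?_eq_getElem (by simpa)]
    simp only [List.getElem_map, List.getElem_replicate, Option.some.injEq]
    by_cases hq : q (bl[j]'h2) = true
    · rw [if_pos (hmem.mpr hq), if_pos hq]
    · rw [if_neg (fun hm => hq (hmem.mp hm)), if_neg hq]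
  · rw [List.getElem?_eq_none, List.getElem?_eq_none]
    · simpa using h2
    · rw [pv_scatter_len]
      simpa using h2

theorem pv_main (bl : List (String × String)) (te : List String) :
    match_sides_from_binaries bl te = match_sides_from_binaries_alt bl te := by
  unfold match_sides_from_binaries match_sides_from_binaries_alt
  set a := PySem.List.pyGetD te 0 "" with ha
  set b := PySem.List.pyGetD te 1 "" with hb
  set c := PySem.List.pyGetD te 2 "" with hc
  have hA := pv_loopA
    (fun i : String × String => (a == i.1 && c == i.2) || (a == i.2 && c == i.1))
    (fun i : String × String => (a == i.1 && b == i.2) || (a == i.2 && b == i.1))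
    (fun i : String × String => (b == i.1 && c == i.2) || (b == i.2 && c == i.1))
    bl 0 [] [] [] rfl rfl rfl
  simp only [Nat.cast_zero, List.nil_append] at hA
  rw [hA]
  have hcond : ∀ (u v : String) (x : String × String),
      ((u == x.1 && v == x.2) || (u == x.2 && v == x.1)) = (fz x.1 x.2 == fz u v) := by
    intro u v x
    simp only [beq_eq_decide, ← Bool.decide_and, ← Bool.decide_or]
    exact decide_eq_decide.mpr (fz_eq_iff x.1 x.2 u v).symm
  have hrepl : ∀ (f : String × String → Int), (∀ x, f x = 0) →
      bl.map f = pvScatter bl.length [] := by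
    intro f hf
    have h0 : pvScatter bl.length [] = List.replicate bl.length 0 := rfl
    rw [h0, List.eq_replicate_iff]
    refine ⟨by simp, ?_⟩
    intro y hy
    obtain ⟨x, _, rfl⟩ := List.mem_map.1 hy
    exact hf x
  refine Prod.ext ?_ (Prod.ext ?_ ?_) <;> simp only []
  · -- AC
    rw [pv_bucket bl (fz a c), pv_scatter bl (fun x => fz x.1 x.2 == fz a c)]
    exact List.map_congr_left (fun x _ => by simp only [hcond])
  · -- AB: when the AB key collides with the popped AC key, both sides are all zero
    by_cases hKab : fz a b = fz a c
    · rw [hKab, pv_getD_erase_self]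
      apply hrepl
      intro x
      simp only [hcond, hKab]
      by_cases h : (fz x.1 x.2 == fz a c) = true <;> simp [h]
    · rw [pv_getD_erase_of_ne _ _ _ _ hKab, pv_bucket bl (fz a b),
        pv_scatter bl (fun x => fz x.1 x.2 == fz a b)]
      refine List.map_congr_left (fun x _ => ?_)
      simp only [hcond]
      by_cases h2 : fz x.1 x.2 = fz a b
      · simp [h2, hKab]
      · by_cases h1 : fz x.1 x.2 = fz a c <;> simp [h1, h2, Ne.symm hKab]
  · -- BC: either earlier pop may have consumed the key
    by_cases hKb : fz b c = fz a b
    · rw [hKb, pv_getD_erase_self]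
      apply hrepl
      intro x
      simp only [hcond, hKb]
      by_cases h1 : (fz x.1 x.2 == fz a c) = true <;>
        by_cases h2 : (fz x.1 x.2 == fz a b) = true <;> simp [h1, h2]
    · rw [pv_getD_erase_of_ne _ _ _ _ hKb]
      by_cases hKa : fz b c = fz a c
      · rw [hKa, pv_getD_erase_self]
        apply hrepl
        intro x
        simp only [hcond, hKa]
        by_cases h1 : (fz x.1 x.2 == fz a c) = true <;>
          by_cases h2 : (fz x.1 x.2 == fz a b) = true <;> simp [h1, h2]
      · rw [pv_getD_erase_of_ne _ _ _ _ hKa, pv_bucket bl (fz b c),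
          pv_scatter bl (fun x => fz x.1 x.2 == fz b c)]
        refine List.map_congr_left (fun x _ => ?_)
        simp only [hcond]
        by_cases h3 : fz x.1 x.2 = fz b c
        · simp [h3, hKa, hKb]
        · by_cases h1 : fz x.1 x.2 = fz a c <;> by_cases h2 : fz x.1 x.2 = fz a b <;>
            simp [h1, h2, h3, Ne.symm hKa, Ne.symm hKb]

-- ===== VERDICT (by name: the statement is the Claim_ definition above) =====
theorem match_sides_from_binaries_spec : Claim_equal_match_sides_from_binaries := by
  intro bl te _ _
  exact pv_main bl te
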